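-- pv_equiv track=rewrite | github.com/Utkal97/api-fuzzer | uploadswagger/utilities.py | filterAndGroupLines
-- ===== SOURCE A (Python) =====
-- def filterAndGroupLines(lines):
--     groupedLines = []
--
--     currentLine = {}
--
--     for line in lines:
--         if ("->" in line):
--             currentLine["endPoint"] = line
--         elif ("PREVIOUS RESPONSE" in line):
--             currentLine["response"] = line
--         elif ("producer_timing_delay" in line) or ("max_async_wait_time" in line):
--             pass
--         else:
--             if "endPoint" in currentLine and "response" in currentLine:
--                 groupedLines.append(currentLine)
--             currentLine = {}
--
--     return groupedLines
-- ===== SOURCE B (Python) =====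
-- def filterAndGroupLines(lines):
--     # Phase 1: split the log into segments; any line that is neither a request
--     # ("->"), a previous-response marker, nor a timing line acts as a separator
--     # that completes the segment before it.  A trailing run of lines with no
--     # separator after it is an incomplete segment and yields no group.
--     segments, current = [], []
--     for line in lines:
--         if ("->" in line or "PREVIOUS RESPONSE" in line
--                 or "producer_timing_delay" in line or "max_async_wait_time" in line):
--             current.append(line)
--         else:
--             segments.append(current)
--             current = []
--     # Phase 2: each segment becomes a dict keyed by line kind (last line of a
--     # kind wins); keep only segments that have both an endPoint and a response.
--     groups = []
--     for seg in segments: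
--         d = {("endPoint" if "->" in l else "response"): l
--              for l in seg if "->" in l or "PREVIOUS RESPONSE" in l}
--         if len(d) == 2:
--             groups.append(d)
--     return groups
-- ===== Notes on version B (the rewrite author's own statement) =====
-- stated objective: alternative
-- what changed: Replaced A's incremental state machine (one dict mutated while scanning, flushed whenever a separator line arrives) by a two-phase split-then-map: first split the lines into separator-terminated segments, then turn each segment into a dict with a single comprehension keyed by line kind and keep those with both keys.
import Mathlib
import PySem

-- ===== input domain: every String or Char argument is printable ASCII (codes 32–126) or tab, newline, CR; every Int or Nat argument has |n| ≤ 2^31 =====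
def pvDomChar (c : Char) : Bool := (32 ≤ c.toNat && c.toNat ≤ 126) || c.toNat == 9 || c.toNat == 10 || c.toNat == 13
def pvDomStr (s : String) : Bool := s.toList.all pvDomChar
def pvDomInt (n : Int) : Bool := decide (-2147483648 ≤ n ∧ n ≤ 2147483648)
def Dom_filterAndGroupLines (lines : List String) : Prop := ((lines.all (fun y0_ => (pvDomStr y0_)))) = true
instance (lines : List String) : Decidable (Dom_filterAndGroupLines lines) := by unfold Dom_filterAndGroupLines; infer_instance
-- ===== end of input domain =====

-- B replaces A's incremental dict-and-flush state machine by a two-phase split-then-map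
-- (split on separator lines, then a dict comprehension per segment); alternative, not faster.

-- line predicates ("->" in line, "PREVIOUS RESPONSE" in line, timing substrings in line)
def epLn (line : String) : Bool := PySem.Str.isIn "->" line
def respLn (line : String) : Bool := PySem.Str.isIn "PREVIOUS RESPONSE" line
def timingLn (line : String) : Bool :=
  PySem.Str.isIn "producer_timing_delay" line || PySem.Str.isIn "max_async_wait_time" line

-- ===== PORT A =====  (A's loop body, one step of the state machine)
def aStep (st : List (List (String × String)) × PySem.Dict String String) (line : String) :
    List (List (String × String)) × PySem.Dict String String :=
  if epLn line then (st.1, st.2.insert "endPoint" line)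
  else if respLn line then (st.1, st.2.insert "response" line)
  else if timingLn line then st
  else
    (if st.2.contains "endPoint" && st.2.contains "response" then st.1 ++ [st.2.items] else st.1,
     PySem.Dict.empty)

def filterAndGroupLines (lines : List String) : List (List (String × String)) :=
  (lines.foldl aStep ([], PySem.Dict.empty)).1

-- ===== PORT B =====  (Source B: split into separator-terminated segments, then one dict per segment)
def bSplitStep (st : List (List String) × List String) (line : String) :
    List (List String) × List String :=
  if epLn line || respLn line || timingLn line then (st.1, st.2 ++ [line])
  else (st.1 ++ [st.2], [])

-- the dict comprehension {("endPoint" if "->" in l else "response"): l for l in seg if …}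
def bDict (seg : List String) : PySem.Dict String String :=
  (seg.filter (fun l => epLn l || respLn l)).foldl
    (fun d l => d.insert (if epLn l then "endPoint" else "response") l) PySem.Dict.empty

def bGroup (gs : List (List (String × String))) (seg : List String) :
    List (List (String × String)) :=
  if (bDict seg).size == 2 then gs ++ [(bDict seg).items] else gs

def filterAndGroupLines_alt (lines : List String) : List (List (String × String)) :=
  ((lines.foldl bSplitStep ([], [])).1).foldl bGroup []

-- ===== PRECONDITION & SPEC =====
def Spec_filterAndGroupLines (lines : List String) (out : List (List (String × String))) : Prop := out = filterAndGroupLines_alt lines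
instance (lines : List String) (out : List (List (String × String))) : Decidable (Spec_filterAndGroupLines lines out) := by unfold Spec_filterAndGroupLines; infer_instance

-- ===== CLAIM (what is proved, stated in full; the proofs are below) =====
def Claim_equal_filterAndGroupLines : Prop := ∀ (lines : List String), Dom_filterAndGroupLines lines → Spec_filterAndGroupLines lines (filterAndGroupLines lines)

-- ===== LEMMAS AND PROOFS =====

-- the dict A has built after scanning the lines of the current (open) segment
def dStep (d : PySem.Dict String String) (line : String) : PySem.Dict String String :=
  if epLn line then d.insert "endPoint" line
  else if respLn line then d.insert "response" line
  else d

def dictOf (seg : List String) : PySem.Dict String String :=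
  seg.foldl dStep PySem.Dict.empty

-- B's per-segment dict comprehension builds exactly A's dict
lemma bDict_fold : ∀ (seg : List String) (d : PySem.Dict String String),
    (seg.filter (fun l => epLn l || respLn l)).foldl
      (fun d l => d.insert (if epLn l then "endPoint" else "response") l) d
      = seg.foldl dStep d := by
  intro seg
  induction seg with
  | nil => intro d; rfl
  | cons l rest ih =>
    intro d
    by_cases hep : epLn l = true
    · simp only [List.filter_cons, hep, Bool.true_or, if_true, List.foldl_cons]
      rw [ih]; unfold dStep; simp [hep]
    · by_cases hr : respLn l = true
      · simp only [List.filter_cons, hep, hr, Bool.false_or, if_true, List.foldl_cons]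
        rw [ih]; unfold dStep; simp [hep, hr]
      · simp only [List.filter_cons, hep, hr, Bool.false_or, Bool.false_eq_true, if_false,
          List.foldl_cons]
        rw [ih]; unfold dStep; simp [hep, hr]

lemma bDict_eq_dictOf (seg : List String) : bDict seg = dictOf seg := by
  unfold bDict dictOf
  exact bDict_fold seg PySem.Dict.empty

-- invariant: the keys of the dict are one of five literal lists
def KOK (ks : List String) : Prop :=
  ks = [] ∨ ks = ["endPoint"] ∨ ks = ["response"] ∨
    ks = ["endPoint", "response"] ∨ ks = ["response", "endPoint"]

lemma KOK_insert (d : PySem.Dict String String) (v : String) {k : String}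
    (hk : k = "endPoint" ∨ k = "response") (h : KOK d.keys) : KOK ((d.insert k v).keys) := by
  by_cases hc : d.contains k = true
  · rw [PySem.Dict.keys_insert_of_contains d v hc]; exact h
  · have hc' : d.contains k = false := by simpa using hc
    rw [PySem.Dict.keys_insert_of_not_contains d v hc']
    have hm : k ∉ d.keys := by
      rw [PySem.Dict.contains_eq_decide_mem_keys] at hc'; simpa using hc'
    unfold KOK
    rcases hk with rfl | rfl <;> rcases h with h | h | h | h | h <;> rw [h] at hm ⊢ <;>
      first
      | decide
      | simp at hm

lemma dStep_keys (d : PySem.Dict String String) (l : String) (h : KOK d.keys) :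
    KOK (dStep d l).keys := by
  unfold dStep
  by_cases hep : epLn l = true
  · simpa [hep] using KOK_insert d l (Or.inl rfl) h
  · by_cases hr : respLn l = true
    · simpa [hep, hr] using KOK_insert d l (Or.inr rfl) h
    · simpa [hep, hr] using h

lemma dictOf_keys (seg : List String) : KOK (dictOf seg).keys := by
  unfold dictOf
  have : ∀ (s : List String) (d : PySem.Dict String String), KOK d.keys →
      KOK (s.foldl dStep d).keys := by
    intro s
    induction s with
    | nil => intro d h; exact h
    | cons x xs ih => intro d h; exact ih _ (dStep_keys d x h)
  exact this seg _ (Or.inl (by simp))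

-- the size-2 test equals A's both-keys-present test
lemma size_eq_contains (d : PySem.Dict String String) (h : KOK d.keys) :
    (d.size == 2) = (d.contains "endPoint" && d.contains "response") := by
  have hlen : d.size = d.keys.length := by
    simp [PySem.Dict.size, PySem.Dict.keys]
  rcases h with h | h | h | h | h <;>
    rw [PySem.Dict.contains_eq_decide_mem_keys, PySem.Dict.contains_eq_decide_mem_keys,
      h] <;> rw [hlen, h] <;> decide

-- B's per-segment decision equals A's flush of the accumulated dict
lemma bGroup_eq_flush (gs : List (List (String × String))) (seg : List String) :
    bGroup gs seg =
      (if (dictOf seg).contains "endPoint" && (dictOf seg).contains "response"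
       then gs ++ [(dictOf seg).items] else gs) := by
  unfold bGroup
  rw [bDict_eq_dictOf, size_eq_contains _ (dictOf_keys seg)]

-- main invariant relating A's interleaved fold to B's split-then-map
lemma main_inv (lines : List String) :
    ∀ (segs : List (List String)) (seg : List String),
      (lines.foldl aStep (segs.foldl bGroup [], dictOf seg)).1
        = ((lines.foldl bSplitStep (segs, seg)).1).foldl bGroup [] := by
  induction lines with
  | nil => intro segs seg; rfl
  | cons l rest ih =>
    intro segs seg
    by_cases hep : epLn l = true
    · have ha : aStep (segs.foldl bGroup [], dictOf seg) l
          = (segs.foldl bGroup [], dictOf (seg ++ [l])) := by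
        simp [aStep, hep, dictOf, List.foldl_append, dStep]
      have hb : bSplitStep (segs, seg) l = (segs, seg ++ [l]) := by simp [bSplitStep, hep]
      simp only [List.foldl_cons, ha, hb]
      exact ih segs (seg ++ [l])
    · by_cases hr : respLn l = true
      · have ha : aStep (segs.foldl bGroup [], dictOf seg) l
            = (segs.foldl bGroup [], dictOf (seg ++ [l])) := by
          simp [aStep, hep, hr, dictOf, List.foldl_append, dStep]
        have hb : bSplitStep (segs, seg) l = (segs, seg ++ [l]) := by simp [bSplitStep, hep, hr]
        simp only [List.foldl_cons, ha, hb]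
        exact ih segs (seg ++ [l])
      · by_cases ht : timingLn l = true
        · have ha : aStep (segs.foldl bGroup [], dictOf seg) l
              = (segs.foldl bGroup [], dictOf (seg ++ [l])) := by
            simp [aStep, hep, hr, ht, dictOf, List.foldl_append, dStep]
          have hb : bSplitStep (segs, seg) l = (segs, seg ++ [l]) := by
            simp [bSplitStep, hep, hr, ht]
          simp only [List.foldl_cons, ha, hb]
          exact ih segs (seg ++ [l])
        · have ha : aStep (segs.foldl bGroup [], dictOf seg) l
              = ((segs ++ [seg]).foldl bGroup [], dictOf []) := by
            rw [List.foldl_append]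
            simp only [List.foldl_cons, List.foldl_nil, bGroup_eq_flush]
            simp [aStep, hep, hr, ht, dictOf, PySem.Dict.empty]
          have hb : bSplitStep (segs, seg) l = (segs ++ [seg], []) := by
            simp [bSplitStep, hep, hr, ht]
          simp only [List.foldl_cons, ha, hb]
          exact ih (segs ++ [seg]) []

-- ===== VERDICT (by name: the statement is the Claim_ definition above) =====
theorem filterAndGroupLines_spec : Claim_equal_filterAndGroupLines := by
  intro lines _
  unfold Spec_filterAndGroupLines filterAndGroupLines filterAndGroupLines_alt
  have h := main_inv lines [] []
  simpa [dictOf] using h
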